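-- pv_equiv track=rewrite | github.com/kkkkshi/Leetcode_python | 57. Insert Interval.py | temp_insert
-- ===== SOURCE A (Python) =====
-- def temp_insert(intervals, newInterval):
--     inserted = False
--     results = []
--     for interval in intervals:
--         if newInterval[0] < interval[0] and not inserted:
--             results.append(newInterval)
--             results.append(interval)
--             inserted = True
--         else:
--             results.append(interval)
--     if inserted == False:
--         results.append(newInterval)
--     return results
-- ===== SOURCE B (Python) =====
-- def temp_insert(intervals, newInterval):
--     idx = next((i for i, iv in enumerate(intervals) if newInterval[0] < iv[0]),
--                len(intervals))
--     return intervals[:idx] + [newInterval] + intervals[idx:]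
-- ===== Notes on version B (the rewrite author's own statement) =====
-- stated objective: simpler
-- what changed: B replaces the flag-driven loop with interleaved appends by a search for the insertion index followed by slice concatenation (find position, then build intervals[:idx]+[newInterval]+intervals[idx:]).
import Mathlib
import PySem

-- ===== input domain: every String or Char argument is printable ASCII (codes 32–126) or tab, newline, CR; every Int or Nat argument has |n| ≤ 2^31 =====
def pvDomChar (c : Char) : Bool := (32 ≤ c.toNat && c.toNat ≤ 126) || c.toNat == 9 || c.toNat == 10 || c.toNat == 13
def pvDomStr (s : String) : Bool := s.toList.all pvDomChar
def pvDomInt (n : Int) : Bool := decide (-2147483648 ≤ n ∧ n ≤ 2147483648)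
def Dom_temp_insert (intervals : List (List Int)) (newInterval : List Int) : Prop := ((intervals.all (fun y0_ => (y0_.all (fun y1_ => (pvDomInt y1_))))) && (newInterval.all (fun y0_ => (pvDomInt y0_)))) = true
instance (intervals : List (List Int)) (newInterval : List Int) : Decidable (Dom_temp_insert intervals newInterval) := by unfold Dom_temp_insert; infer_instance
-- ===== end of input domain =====

-- ===== PORT A =====
def loopA (nh : Int) (newInterval : List Int) : List (List Int) → Bool → List (List Int)
  | [], inserted => if inserted = false then [newInterval] else []
  | interval :: rest, inserted =>
      if nh < (PySem.List.pyGet? interval 0).getD 0 ∧ !inserted then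
        newInterval :: interval :: loopA nh newInterval rest true
      else
        interval :: loopA nh newInterval rest inserted

def temp_insert (intervals : List (List Int)) (newInterval : List Int) : List (List Int) :=
  loopA ((PySem.List.pyGet? newInterval 0).getD 0) newInterval intervals false

-- ===== PORT B =====
-- index of the first interval whose start exceeds newInterval[0] (the generator in Source B)
def findPos (nh : Int) : List (List Int) → Nat
  | [] => 0
  | iv :: rest => if nh < (PySem.List.pyGet? iv 0).getD 0 then 0 else 1 + findPos nh rest

def temp_insert_alt (intervals : List (List Int)) (newInterval : List Int) : List (List Int) :=
  let idx := findPos ((PySem.List.pyGet? newInterval 0).getD 0) intervals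
  intervals.take idx ++ [newInterval] ++ intervals.drop idx

-- ===== PRECONDITION & SPEC =====
-- Pre_ excludes exactly the inputs on which A raises IndexError: with a nonempty intervals list,
-- an empty newInterval or any empty interval makes A's comparison newInterval[0] < interval[0] raise.
def Pre_temp_insert (intervals : List (List Int)) (newInterval : List Int) : Prop :=
  intervals = [] ∨ (newInterval ≠ [] ∧ ∀ iv ∈ intervals, iv ≠ [])
instance (intervals : List (List Int)) (newInterval : List Int) : Decidable (Pre_temp_insert intervals newInterval) := by unfold Pre_temp_insert; infer_instance
def pvWitness_temp_insert : List (List Int) × List Int := ([[1, 3], [6, 9]], [2, 5])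

def Spec_temp_insert (intervals : List (List Int)) (newInterval : List Int) (out : List (List Int)) : Prop := out = temp_insert_alt intervals newInterval
instance (intervals : List (List Int)) (newInterval : List Int) (out : List (List Int)) : Decidable (Spec_temp_insert intervals newInterval out) := by unfold Spec_temp_insert; infer_instance

-- ===== CLAIM (what is proved, stated in full; the proofs are below) =====
def Claim_equal_temp_insert : Prop := ∀ (intervals : List (List Int)) (newInterval : List Int), Dom_temp_insert intervals newInterval → Pre_temp_insert intervals newInterval → Spec_temp_insert intervals newInterval (temp_insert intervals newInterval)

-- ===== LEMMAS AND PROOFS =====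


lemma loopA_inserted (nh : Int) (nI : List Int) (l : List (List Int)) :
    loopA nh nI l true = l := by
  induction l with
  | nil => rfl
  | cons iv rest ih => simp [loopA, ih]

lemma loopA_eq_alt (nh : Int) (nI : List Int) (l : List (List Int)) :
    loopA nh nI l false = l.take (findPos nh l) ++ [nI] ++ l.drop (findPos nh l) := by
  induction l with
  | nil => rfl
  | cons iv rest ih =>
    by_cases h : nh < (PySem.List.pyGet? iv 0).getD 0
    · simp [loopA, findPos, h, loopA_inserted]
    · simp [loopA, findPos, h, ih, Nat.add_comm 1, List.take_succ_cons, List.drop_succ_cons]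

-- ===== VERDICT (by name: the statement is the Claim_ definition above) =====
theorem temp_insert_spec : Claim_equal_temp_insert := by
  intro intervals newInterval _ _
  unfold Spec_temp_insert temp_insert temp_insert_alt
  exact loopA_eq_alt _ _ _
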